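-- pv_equiv track=rewrite | github.com/RizgarMella/academy-timetable-system | solver/engine.py | _get_qualified_lecturers
-- ===== SOURCE A (Python) =====
-- def _get_qualified_lecturers(module_id, data, lec_total_hours):
--     """Get qualified lecturers sorted by proficiency then load balance."""
--     quals = data['quals_by_module'].get(module_id, [])
--     prof_order = {'primary': 0, 'secondary': 1, 'emergency': 2}
--
--     result = []
--     for lec_id, prof, can_exam in quals:
--         result.append((
--             lec_id, prof,
--             prof_order.get(prof, 3),
--             lec_total_hours.get(lec_id, 0),
--         ))
--
--     result.sort(key=lambda x: (x[2], x[3]))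
--     return [(r[0], r[1]) for r in result]
-- ===== SOURCE B (Python) =====
-- def _get_qualified_lecturers(module_id, data, lec_total_hours):
--     """Bucket by proficiency rank in one pass, then stably sort each bucket by load only."""
--     quals = data['quals_by_module'].get(module_id, [])
--     primary, secondary, emergency, other = [], [], [], []
--     for lec_id, prof, can_exam in quals:
--         if prof == 'primary':
--             primary.append((lec_id, prof))
--         elif prof == 'secondary':
--             secondary.append((lec_id, prof))
--         elif prof == 'emergency':
--             emergency.append((lec_id, prof))
--         else:
--             other.append((lec_id, prof))
--     out = []
--     for bucket in (primary, secondary, emergency, other):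
--         out.extend(sorted(bucket, key=lambda p: lec_total_hours.get(p[0], 0)))
--     return out
-- ===== Notes on version B (the rewrite author's own statement) =====
-- stated objective: alternative
-- what changed: Replaces the decorate-with-(rank,load)-sort-by-tuple-key-undecorate pipeline by a one-pass distribution into four proficiency buckets, a stable sort of each bucket by load only, and concatenation; equal because a stable sort on a lexicographic (rank, load) key equals grouping by rank then stably sorting each group by load.
import Mathlib
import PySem

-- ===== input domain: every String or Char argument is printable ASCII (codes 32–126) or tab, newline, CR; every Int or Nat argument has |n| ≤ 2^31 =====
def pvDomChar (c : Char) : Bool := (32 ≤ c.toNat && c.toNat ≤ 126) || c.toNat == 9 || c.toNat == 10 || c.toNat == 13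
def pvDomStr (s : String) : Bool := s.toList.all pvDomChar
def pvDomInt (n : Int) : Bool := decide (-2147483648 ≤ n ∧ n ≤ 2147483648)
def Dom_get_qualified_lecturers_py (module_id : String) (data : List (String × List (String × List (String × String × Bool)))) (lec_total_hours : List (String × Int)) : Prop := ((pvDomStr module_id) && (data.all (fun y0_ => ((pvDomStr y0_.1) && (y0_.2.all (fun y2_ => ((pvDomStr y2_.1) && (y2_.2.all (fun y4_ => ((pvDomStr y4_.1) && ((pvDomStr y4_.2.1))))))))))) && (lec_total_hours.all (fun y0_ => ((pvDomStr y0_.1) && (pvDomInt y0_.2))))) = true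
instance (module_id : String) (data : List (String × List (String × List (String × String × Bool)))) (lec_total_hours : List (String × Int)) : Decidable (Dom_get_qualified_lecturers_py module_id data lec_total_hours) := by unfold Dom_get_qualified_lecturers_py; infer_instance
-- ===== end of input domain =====

-- B buckets lecturers by proficiency in one pass and stably sorts each bucket by load only,
-- instead of A's decorate / sort-by-(rank,load)-tuple / undecorate pipeline; same result, proved below.

-- ===== PORT A =====
def get_qualified_lecturers_py (module_id : String) (data : List (String × List (String × List (String × String × Bool)))) (lec_total_hours : List (String × Int)) : List (String × String) :=
  -- data['quals_by_module'] raises KeyError when the key is absent: excluded by Pre_ (default [] there)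
  let quals := PySem.Dict.getD (PySem.Dict.mk (PySem.Dict.getD (PySem.Dict.mk data) "quals_by_module" [])) module_id []
  let prof_order : PySem.Dict String Int := PySem.Dict.mk [("primary", 0), ("secondary", 1), ("emergency", 2)]
  let result := quals.foldl (fun acc q =>
    acc ++ [(q.1, q.2.1, PySem.Dict.getD prof_order q.2.1 3, PySem.Dict.getD (PySem.Dict.mk lec_total_hours) q.1 0)]) []
  let result := PySem.List.sorted2 result (fun x => x.2.2.1) (fun x => x.2.2.2)
  result.map (fun r => (r.1, r.2.1))

-- ===== PORT B =====
def get_qualified_lecturers_py_alt (module_id : String) (data : List (String × List (String × List (String × String × Bool)))) (lec_total_hours : List (String × Int)) : List (String × String) :=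
  -- same KeyError spot as A: excluded by Pre_ (default [] there)
  let quals := PySem.Dict.getD (PySem.Dict.mk (PySem.Dict.getD (PySem.Dict.mk data) "quals_by_module" [])) module_id []
  let bs := quals.foldl (fun (bs : List (String × String) × List (String × String) × List (String × String) × List (String × String)) q =>
      if q.2.1 = "primary" then (bs.1 ++ [(q.1, q.2.1)], bs.2.1, bs.2.2.1, bs.2.2.2)
      else if q.2.1 = "secondary" then (bs.1, bs.2.1 ++ [(q.1, q.2.1)], bs.2.2.1, bs.2.2.2)
      else if q.2.1 = "emergency" then (bs.1, bs.2.1, bs.2.2.1 ++ [(q.1, q.2.1)], bs.2.2.2)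
      else (bs.1, bs.2.1, bs.2.2.1, bs.2.2.2 ++ [(q.1, q.2.1)])) ([], [], [], [])
  PySem.List.sorted bs.1 (fun p => PySem.Dict.getD (PySem.Dict.mk lec_total_hours) p.1 0)
    ++ PySem.List.sorted bs.2.1 (fun p => PySem.Dict.getD (PySem.Dict.mk lec_total_hours) p.1 0)
    ++ PySem.List.sorted bs.2.2.1 (fun p => PySem.Dict.getD (PySem.Dict.mk lec_total_hours) p.1 0)
    ++ PySem.List.sorted bs.2.2.2 (fun p => PySem.Dict.getD (PySem.Dict.mk lec_total_hours) p.1 0)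

-- ===== PRECONDITION & SPEC =====
-- Pre_ excludes exactly the inputs where data lacks the key 'quals_by_module', on which A raises KeyError (B raises there too).
def Pre_get_qualified_lecturers_py (module_id : String) (data : List (String × List (String × List (String × String × Bool)))) (lec_total_hours : List (String × Int)) : Prop :=
  data.any (fun e => e.1 = "quals_by_module") = true
instance (module_id : String) (data : List (String × List (String × List (String × String × Bool)))) (lec_total_hours : List (String × Int)) : Decidable (Pre_get_qualified_lecturers_py module_id data lec_total_hours) := by unfold Pre_get_qualified_lecturers_py; infer_instance

def pvWitness_get_qualified_lecturers_py : String × (List (String × List (String × List (String × String × Bool)))) × (List (String × Int)) :=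
  ("m1", [("quals_by_module", [("m1", [("l1", "primary", true), ("l2", "weird", false)])])], [("l1", 3)])

def Spec_get_qualified_lecturers_py (module_id : String) (data : List (String × List (String × List (String × String × Bool)))) (lec_total_hours : List (String × Int)) (out : List (String × String)) : Prop := out = get_qualified_lecturers_py_alt module_id data lec_total_hours
instance (module_id : String) (data : List (String × List (String × List (String × String × Bool)))) (lec_total_hours : List (String × Int)) (out : List (String × String)) : Decidable (Spec_get_qualified_lecturers_py module_id data lec_total_hours out) := by unfold Spec_get_qualified_lecturers_py; infer_instance

-- ===== CLAIM (what is proved, stated in full; the proofs are below) =====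
def Claim_equal_get_qualified_lecturers_py : Prop := ∀ (module_id : String) (data : List (String × List (String × List (String × String × Bool)))) (lec_total_hours : List (String × Int)), Dom_get_qualified_lecturers_py module_id data lec_total_hours → Pre_get_qualified_lecturers_py module_id data lec_total_hours → Spec_get_qualified_lecturers_py module_id data lec_total_hours (get_qualified_lecturers_py module_id data lec_total_hours)

-- ===== LEMMAS AND PROOFS =====

-- insertBy passes over a prefix it does not insert into
lemma insertBy_skip {α : Type} (before : α → α → Bool) (x : α) (ys zs : List α)
    (h : ∀ y ∈ ys, before x y = false) :
    PySem.List.insertBy before x (ys ++ zs) = ys ++ PySem.List.insertBy before x zs := by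
  induction ys with
  | nil => rfl
  | cons y ys ih =>
    simp only [List.cons_append, PySem.List.insertBy, h y (by simp)]
    simp only [Bool.false_eq_true, if_false, List.cons.injEq, true_and]
    exact ih (fun y hy => h y (by simp [hy]))

-- insertBy never enters a suffix every element of which it must precede
lemma insertBy_stop {α : Type} (before : α → α → Bool) (x : α) (ys zs : List α)
    (h : ∀ z ∈ zs, before x z = true) :
    PySem.List.insertBy before x (ys ++ zs) = PySem.List.insertBy before x ys ++ zs := by
  induction ys with
  | nil =>
    cases zs with
    | nil => rfl
    | cons z zs => simp [PySem.List.insertBy, h z (by simp)]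
  | cons y ys ih =>
    simp only [List.cons_append, PySem.List.insertBy]
    by_cases hb : before x y = true
    · simp [hb]
    · simp [hb, ih]

-- insertBy only looks at comparisons with list members
lemma insertBy_congr {α : Type} (before before' : α → α → Bool) (x : α) (ys : List α)
    (h : ∀ y ∈ ys, before x y = before' x y) :
    PySem.List.insertBy before x ys = PySem.List.insertBy before' x ys := by
  induction ys with
  | nil => rfl
  | cons y ys ih =>
    simp only [PySem.List.insertBy, h y (by simp)]
    rw [ih (fun y hy => h y (by simp [hy]))]

-- insertBy commutes with map when the comparison factors through the map
lemma insertBy_map {α β : Type} (before : β → β → Bool) (g : α → β) (x : α) (ys : List α) :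
    (PySem.List.insertBy (fun a b => before (g a) (g b)) x ys).map g
      = PySem.List.insertBy before (g x) (ys.map g) := by
  induction ys with
  | nil => rfl
  | cons y ys ih =>
    simp only [PySem.List.insertBy, List.map_cons]
    by_cases hb : before (g x) (g y) = true
    · simp [hb]
    · simp [hb, ih]

-- a stable sort commutes with map when the key factors through the map
lemma sorted_map {α β : Type} (g : α → β) (key : β → Int) (l : List α) :
    (PySem.List.sorted l (fun a => key (g a))).map g = PySem.List.sorted (l.map g) key := by
  rw [PySem.List.sorted_eq_foldl_insertBy, PySem.List.sorted_eq_foldl_insertBy, List.foldl_map]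
  suffices h : ∀ acc : List α,
      (List.foldl (fun acc x => PySem.List.insertBy (fun a b => decide (key (g a) < key (g b))) x acc) acc l).map g
        = List.foldl (fun acc x => PySem.List.insertBy (fun a b => decide (key a < key b)) (g x) acc) (acc.map g) l by
    simpa using h []
  induction l with
  | nil => intro acc; rfl
  | cons x l ih =>
    intro acc
    simp only [List.foldl_cons, ih, insertBy_map (fun a b => decide (key a < key b)) g x acc]

-- the lexicographic comparison used by sorted2 (reverse = false)
def lexBefore {α : Type} (k1 k2 : α → Int) (a b : α) : Bool :=
  decide (k1 a < k1 b) || (!decide (k1 b < k1 a) && decide (k2 a < k2 b))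

lemma sorted2_eq_foldl {α : Type} (xs : List α) (k1 k2 : α → Int) :
    PySem.List.sorted2 xs k1 k2 = List.foldl (fun acc x => PySem.List.insertBy (lexBefore k1 k2) x acc) [] xs := rfl

-- KEY LEMMA: a stable sort on the lexicographic (k1, k2) key, with k1 ranging over {0,1,2,3},
-- equals grouping by k1 then stably sorting each group by k2, concatenated in k1 order.
lemma sorted2_bucket {α : Type} (T : List α) (k1 k2 : α → Int)
    (h : ∀ r ∈ T, k1 r = 0 ∨ k1 r = 1 ∨ k1 r = 2 ∨ k1 r = 3) :
    PySem.List.sorted2 T k1 k2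
      = PySem.List.sorted (T.filter (fun r => k1 r == 0)) k2
        ++ PySem.List.sorted (T.filter (fun r => k1 r == 1)) k2
        ++ PySem.List.sorted (T.filter (fun r => k1 r == 2)) k2
        ++ PySem.List.sorted (T.filter (fun r => k1 r == 3)) k2 := by
  induction T using List.reverseRecOn with
  | nil => rfl
  | append_singleton l x ih =>
    have hx := h x (by simp)
    have hl : ∀ r ∈ l, k1 r = 0 ∨ k1 r = 1 ∨ k1 r = 2 ∨ k1 r = 3 :=
      fun r hr => h r (by simp [hr])
    have hstep : PySem.List.sorted2 (l ++ [x]) k1 k2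
        = PySem.List.insertBy (lexBefore k1 k2) x (PySem.List.sorted2 l k1 k2) := by
      rw [sorted2_eq_foldl, sorted2_eq_foldl, List.foldl_append]; rfl
    have hsfilter : ∀ (i : Int), PySem.List.sorted ((l ++ [x]).filter (fun r => k1 r == i)) k2
        = if k1 x = i then PySem.List.insertBy (fun a b => decide (k2 a < k2 b)) x (PySem.List.sorted (l.filter (fun r => k1 r == i)) k2)
          else PySem.List.sorted (l.filter (fun r => k1 r == i)) k2 := by
      intro i
      rw [List.filter_append]
      by_cases hi : k1 x = i
      · simp only [List.filter_singleton, hi, beq_self_eq_true, if_pos]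
        rw [PySem.List.sorted_eq_foldl_insertBy, PySem.List.sorted_eq_foldl_insertBy, List.foldl_append]
        simp [hi]
      · have : (([x] : List α).filter (fun r => k1 r == i)) = [] := by
          simp [List.filter_singleton, hi]
        simp [this, hi]
    have hmem : ∀ (i : Int) (y : α), y ∈ PySem.List.sorted (l.filter (fun r => k1 r == i)) k2 → k1 y = i := by
      intro i y hy
      rw [PySem.List.mem_sorted] at hy
      have := List.of_mem_filter hy
      simpa using this
    rw [hstep, ih hl, hsfilter, hsfilter, hsfilter, hsfilter]
    -- abbreviations
    set S0 := PySem.List.sorted (l.filter (fun r => k1 r == (0:Int))) k2 with hS0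
    set S1 := PySem.List.sorted (l.filter (fun r => k1 r == (1:Int))) k2 with hS1
    set S2 := PySem.List.sorted (l.filter (fun r => k1 r == (2:Int))) k2 with hS2
    set S3 := PySem.List.sorted (l.filter (fun r => k1 r == (3:Int))) k2 with hS3
    have skip : ∀ (i j : Int) (S : List α), (∀ y ∈ S, k1 y = j) → j < i → k1 x = i →
        ∀ y ∈ S, lexBefore k1 k2 x y = false := by
      intro i j S hS hji hxi y hy
      have := hS y hy
      simp [lexBefore, this, hxi]
      omega
    have stop : ∀ (i j : Int) (S : List α), (∀ y ∈ S, k1 y = j) → i < j → k1 x = i →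
        ∀ y ∈ S, lexBefore k1 k2 x y = true := by
      intro i j S hS hij hxi y hy
      have := hS y hy
      simp [lexBefore, this, hxi]
      omega
    have eqc : ∀ (i : Int) (S : List α), (∀ y ∈ S, k1 y = i) → k1 x = i →
        ∀ y ∈ S, lexBefore k1 k2 x y = decide (k2 x < k2 y) := by
      intro i S hS hxi y hy
      have := hS y hy
      simp [lexBefore, this, hxi]
    rcases hx with hx | hx | hx | hx
    · rw [if_pos hx, if_neg (by omega), if_neg (by omega), if_neg (by omega)]
      rw [show S0 ++ S1 ++ S2 ++ S3 = S0 ++ (S1 ++ (S2 ++ S3)) by simp]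
      rw [insertBy_stop _ _ _ _ (by
        intro z hz
        rcases List.mem_append.mp hz with hz | hz
        · exact stop 0 1 S1 (hmem 1) (by omega) hx z hz
        · rcases List.mem_append.mp hz with hz | hz
          · exact stop 0 2 S2 (hmem 2) (by omega) hx z hz
          · exact stop 0 3 S3 (hmem 3) (by omega) hx z hz)]
      rw [insertBy_congr _ (fun a b => decide (k2 a < k2 b)) _ _ (eqc 0 S0 (hmem 0) hx)]
      simp
    · rw [if_neg (by omega), if_pos hx, if_neg (by omega), if_neg (by omega)]
      rw [show S0 ++ S1 ++ S2 ++ S3 = S0 ++ (S1 ++ (S2 ++ S3)) by simp]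
      rw [insertBy_skip _ _ _ _ (skip 1 0 S0 (hmem 0) (by omega) hx)]
      rw [insertBy_stop _ _ _ _ (by
        intro z hz
        rcases List.mem_append.mp hz with hz | hz
        · exact stop 1 2 S2 (hmem 2) (by omega) hx z hz
        · exact stop 1 3 S3 (hmem 3) (by omega) hx z hz)]
      rw [insertBy_congr _ (fun a b => decide (k2 a < k2 b)) _ _ (eqc 1 S1 (hmem 1) hx)]
      simp
    · rw [if_neg (by omega), if_neg (by omega), if_pos hx, if_neg (by omega)]
      rw [show S0 ++ S1 ++ S2 ++ S3 = (S0 ++ S1) ++ (S2 ++ S3) by simp]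
      rw [insertBy_skip _ _ _ _ (by
        intro y hy
        rcases List.mem_append.mp hy with hy | hy
        · exact skip 2 0 S0 (hmem 0) (by omega) hx y hy
        · exact skip 2 1 S1 (hmem 1) (by omega) hx y hy)]
      rw [insertBy_stop _ _ _ _ (stop 2 3 S3 (hmem 3) (by omega) hx)]
      rw [insertBy_congr _ (fun a b => decide (k2 a < k2 b)) _ _ (eqc 2 S2 (hmem 2) hx)]
      simp
    · rw [if_neg (by omega), if_neg (by omega), if_neg (by omega), if_pos hx]
      rw [insertBy_skip _ _ _ _ (by
        intro y hy
        rcases List.mem_append.mp hy with hy | hy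
        · rcases List.mem_append.mp hy with hy | hy
          · exact skip 3 0 S0 (hmem 0) (by omega) hx y hy
          · exact skip 3 1 S1 (hmem 1) (by omega) hx y hy
        · exact skip 3 2 S2 (hmem 2) (by omega) hx y hy)]
      rw [insertBy_congr _ (fun a b => decide (k2 a < k2 b)) _ _ (eqc 3 S3 (hmem 3) hx)]

-- B's bucket-distributing fold equals four filters
lemma bucket_fold (quals : List (String × String × Bool))
    (a b c d : List (String × String)) :
    quals.foldl (fun (bs : List (String × String) × List (String × String) × List (String × String) × List (String × String)) q =>
      if q.2.1 = "primary" then (bs.1 ++ [(q.1, q.2.1)], bs.2.1, bs.2.2.1, bs.2.2.2)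
      else if q.2.1 = "secondary" then (bs.1, bs.2.1 ++ [(q.1, q.2.1)], bs.2.2.1, bs.2.2.2)
      else if q.2.1 = "emergency" then (bs.1, bs.2.1, bs.2.2.1 ++ [(q.1, q.2.1)], bs.2.2.2)
      else (bs.1, bs.2.1, bs.2.2.1, bs.2.2.2 ++ [(q.1, q.2.1)])) (a, b, c, d)
    = (a ++ (quals.filter (fun q => q.2.1 == "primary")).map (fun q => (q.1, q.2.1)),
       b ++ (quals.filter (fun q => q.2.1 == "secondary")).map (fun q => (q.1, q.2.1)),
       c ++ (quals.filter (fun q => q.2.1 == "emergency")).map (fun q => (q.1, q.2.1)),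
       d ++ (quals.filter (fun q => !(q.2.1 == "primary") && !(q.2.1 == "secondary") && !(q.2.1 == "emergency"))).map (fun q => (q.1, q.2.1))) := by
  induction quals generalizing a b c d with
  | nil => simp
  | cons q quals ih =>
    by_cases h1 : q.2.1 = "primary"
    · simp [h1, ih]
    · by_cases h2 : q.2.1 = "secondary"
      · simp [h1, h2, ih]
      · by_cases h3 : q.2.1 = "emergency"
        · simp [h1, h2, h3, ih]
        · simp [h1, h2, h3, ih]

-- the proficiency rank of a triple, as A computes it
def rankOf (q : String × String × Bool) : Int :=
  PySem.Dict.getD (PySem.Dict.mk [("primary", (0:Int)), ("secondary", 1), ("emergency", 2)]) q.2.1 3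

lemma rank_cases (q : String × String × Bool) :
    rankOf q = 0 ∨ rankOf q = 1 ∨ rankOf q = 2 ∨ rankOf q = 3 := by
  unfold rankOf
  by_cases h1 : q.2.1 = "primary"
  · simp [PySem.Dict.getD, PySem.Dict.get?, List.find?, h1]
  · by_cases h2 : q.2.1 = "secondary"
    · simp [PySem.Dict.getD, PySem.Dict.get?, List.find?, h1, h2]
    · by_cases h3 : q.2.1 = "emergency"
      · simp [PySem.Dict.getD, PySem.Dict.get?, List.find?, h1, h2, h3]
      · simp [PySem.Dict.getD, PySem.Dict.get?, List.find?,
          beq_eq_false_iff_ne.mpr (fun h => h1 h.symm),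
          beq_eq_false_iff_ne.mpr (fun h => h2 h.symm),
          beq_eq_false_iff_ne.mpr (fun h => h3 h.symm)]

-- the proficiency-rank test equals B's string tests
lemma cond_prim (q : String × String × Bool) :
    (PySem.Dict.getD (PySem.Dict.mk [("primary", (0:Int)), ("secondary", 1), ("emergency", 2)]) q.2.1 3 == (0:Int)) = (q.2.1 == "primary") := by
  by_cases h1 : q.2.1 = "primary"
  · simp [PySem.Dict.getD, PySem.Dict.get?, List.find?, h1]
  · by_cases h2 : q.2.1 = "secondary"
    · simp [PySem.Dict.getD, PySem.Dict.get?, List.find?, h1, h2]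
    · by_cases h3 : q.2.1 = "emergency"
      · simp [PySem.Dict.getD, PySem.Dict.get?, List.find?, h1, h2, h3]
      · simp [PySem.Dict.getD, PySem.Dict.get?, List.find?, h1,
          beq_eq_false_iff_ne.mpr (fun h => h1 h.symm),
          beq_eq_false_iff_ne.mpr (fun h => h2 h.symm),
          beq_eq_false_iff_ne.mpr (fun h => h3 h.symm)]

lemma cond_sec (q : String × String × Bool) :
    (PySem.Dict.getD (PySem.Dict.mk [("primary", (0:Int)), ("secondary", 1), ("emergency", 2)]) q.2.1 3 == (1:Int)) = (q.2.1 == "secondary") := by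
  by_cases h1 : q.2.1 = "primary"
  · simp [PySem.Dict.getD, PySem.Dict.get?, List.find?, h1]
  · by_cases h2 : q.2.1 = "secondary"
    · simp [PySem.Dict.getD, PySem.Dict.get?, List.find?, h1, h2]
    · by_cases h3 : q.2.1 = "emergency"
      · simp [PySem.Dict.getD, PySem.Dict.get?, List.find?, h1, h2, h3]
      · simp [PySem.Dict.getD, PySem.Dict.get?, List.find?, h2,
          beq_eq_false_iff_ne.mpr (fun h => h1 h.symm),
          beq_eq_false_iff_ne.mpr (fun h => h2 h.symm),
          beq_eq_false_iff_ne.mpr (fun h => h3 h.symm)]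

lemma cond_eme (q : String × String × Bool) :
    (PySem.Dict.getD (PySem.Dict.mk [("primary", (0:Int)), ("secondary", 1), ("emergency", 2)]) q.2.1 3 == (2:Int)) = (q.2.1 == "emergency") := by
  by_cases h1 : q.2.1 = "primary"
  · simp [PySem.Dict.getD, PySem.Dict.get?, List.find?, h1]
  · by_cases h2 : q.2.1 = "secondary"
    · simp [PySem.Dict.getD, PySem.Dict.get?, List.find?, h1, h2]
    · by_cases h3 : q.2.1 = "emergency"
      · simp [PySem.Dict.getD, PySem.Dict.get?, List.find?, h1, h2, h3]
      · simp [PySem.Dict.getD, PySem.Dict.get?, List.find?, h3,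
          beq_eq_false_iff_ne.mpr (fun h => h1 h.symm),
          beq_eq_false_iff_ne.mpr (fun h => h2 h.symm),
          beq_eq_false_iff_ne.mpr (fun h => h3 h.symm)]

lemma cond_oth (q : String × String × Bool) :
    (PySem.Dict.getD (PySem.Dict.mk [("primary", (0:Int)), ("secondary", 1), ("emergency", 2)]) q.2.1 3 == (3:Int)) = (!(q.2.1 == "primary") && !(q.2.1 == "secondary") && !(q.2.1 == "emergency")) := by
  by_cases h1 : q.2.1 = "primary"
  · simp [PySem.Dict.getD, PySem.Dict.get?, List.find?, h1]
  · by_cases h2 : q.2.1 = "secondary"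
    · simp [PySem.Dict.getD, PySem.Dict.get?, List.find?, h1, h2]
    · by_cases h3 : q.2.1 = "emergency"
      · simp [PySem.Dict.getD, PySem.Dict.get?, List.find?, h1, h2, h3]
      · simp [PySem.Dict.getD, PySem.Dict.get?, List.find?, h1, h2, h3,
          beq_eq_false_iff_ne.mpr (fun h => h1 h.symm),
          beq_eq_false_iff_ne.mpr (fun h => h2 h.symm),
          beq_eq_false_iff_ne.mpr (fun h => h3 h.symm)]

-- one bucket of A's decorated sort equals B's sort of the corresponding filtered pairs
lemma bucket_eq (lth : List (String × Int)) (quals : List (String × String × Bool)) (i : Int)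
    (cond : String × String × Bool → Bool)
    (hc : ∀ q : String × String × Bool,
      (PySem.Dict.getD (PySem.Dict.mk [("primary", (0:Int)), ("secondary", 1), ("emergency", 2)]) q.2.1 3 == i) = cond q) :
    (PySem.List.sorted ((quals.map (fun q => (q.1, q.2.1, PySem.Dict.getD (PySem.Dict.mk [("primary", (0:Int)), ("secondary", 1), ("emergency", 2)]) q.2.1 3, PySem.Dict.getD (PySem.Dict.mk lth) q.1 0))).filter (fun r => r.2.2.1 == i)) (fun r => r.2.2.2)).map (fun r => (r.1, r.2.1))
    = PySem.List.sorted ((quals.filter cond).map (fun q => (q.1, q.2.1))) (fun p => PySem.Dict.getD (PySem.Dict.mk lth) p.1 0) := by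
  rw [List.filter_map]
  simp only [Function.comp_def]
  rw [List.filter_congr (fun q _ => hc q)]
  rw [← sorted_map (fun q : String × String × Bool => (q.1, q.2.1)) (fun p => PySem.Dict.getD (PySem.Dict.mk lth) p.1 0) (quals.filter cond)]
  rw [← sorted_map (fun q : String × String × Bool => (q.1, q.2.1, PySem.Dict.getD (PySem.Dict.mk [("primary", (0:Int)), ("secondary", 1), ("emergency", 2)]) q.2.1 3, PySem.Dict.getD (PySem.Dict.mk lth) q.1 0)) (fun r => r.2.2.2) (quals.filter cond)]
  rw [List.map_map]
  rfl

-- ===== VERDICT (by name: the statement is the Claim_ definition above) =====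
theorem get_qualified_lecturers_py_spec : Claim_equal_get_qualified_lecturers_py := by
  intro module_id data lec_total_hours _ _
  unfold Spec_get_qualified_lecturers_py
  unfold get_qualified_lecturers_py get_qualified_lecturers_py_alt
  simp only [PySem.List.foldl_append_singleton_eq_map, List.nil_append, bucket_fold]
  rw [sorted2_bucket _ _ _ (by
    intro r hr
    obtain ⟨q, hq, rfl⟩ := List.mem_map.mp hr
    exact rank_cases q)]
  rw [List.map_append, List.map_append, List.map_append]
  rw [bucket_eq _ _ _ _ cond_prim, bucket_eq _ _ _ _ cond_sec,
      bucket_eq _ _ _ _ cond_eme, bucket_eq _ _ _ _ cond_oth]
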